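-- pv_equiv track=rewrite | github.com/digdir/digdir-camp-2025-desKI | dataCleansing/data_cleansing.py | split_into_cases
-- ===== SOURCE A (Python) =====
-- def split_into_cases(text):
--     if not text:
--         return []
--
--     cases = []
--     current_case = ""
--
--     for line in text.splitlines():
--         if line.strip().startswith("=== Sak:"):
--             if current_case:
--                 cases.append(current_case.strip())
--             current_case = line + "\n"
--         else:
--             current_case += line + "\n"
--
--     if current_case:
--         cases.append(current_case.strip())
--
--     return cases
-- ===== SOURCE B (Python) =====
-- def _split_head(lines):
--     # Peel leading non-delimiter lines off `lines`; return (head, rest).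
--     head = []
--     rest = lines
--     while rest and not rest[0].strip().startswith("=== Sak:"):
--         head.append(rest[0])
--         rest = rest[1:]
--     return head, rest
--
--
-- def _cases(lines):
--     # First line always opens a case block; the block runs until the next
--     # delimiter line (or the end). Recurse on the remainder.
--     if not lines:
--         return []
--     head, rest = _split_head(lines[1:])
--     return ["\n".join([lines[0]] + head).strip()] + _cases(rest)
--
--
-- def split_into_cases(text):
--     if not text:
--         return []
--     return _cases(text.splitlines())
-- ===== Notes on version B (the rewrite author's own statement) =====
-- stated objective: alternative
-- what changed: Replaces the single fold that grows a current-case string character-by-character (with strip-and-flush at each delimiter) by a recursive grouping: peel one block of lines per step (first line plus the run of non-delimiter lines) and join/strip each whole block at once.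
import Mathlib
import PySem

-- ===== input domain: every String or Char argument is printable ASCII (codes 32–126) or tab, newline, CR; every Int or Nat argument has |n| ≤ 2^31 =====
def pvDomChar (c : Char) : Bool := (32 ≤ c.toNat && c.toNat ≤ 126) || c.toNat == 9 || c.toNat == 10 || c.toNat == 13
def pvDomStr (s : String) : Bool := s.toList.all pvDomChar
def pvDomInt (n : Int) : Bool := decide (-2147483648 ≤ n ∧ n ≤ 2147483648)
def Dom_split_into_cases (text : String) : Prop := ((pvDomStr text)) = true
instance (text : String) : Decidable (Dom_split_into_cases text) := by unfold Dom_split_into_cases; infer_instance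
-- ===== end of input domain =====

-- B replaces A's fold with an on-the-fly string accumulator by a recursive
-- block-at-a-time grouping (peel one case block per step, join/strip it whole);
-- objective: alternative decomposition, same cost.

-- ===== PORT A =====
-- `line.strip().startswith("=== Sak:")` (the same test both Pythons write inline)
def pvIsDelim (line : String) : Bool := PySem.Str.startswith (PySem.Str.strip line) "=== Sak:"

-- the body of A's `for line in text.splitlines(): ...` over (cases, current_case)
def pvStepA (st : List String × String) (line : String) : List String × String :=
  if pvIsDelim line then
    (if st.2 ≠ "" then st.1 ++ [PySem.Str.strip st.2] else st.1, line ++ "\n")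
  else
    (st.1, st.2 ++ line ++ "\n")

-- A's trailing `if current_case: cases.append(current_case.strip())`
def pvFinishA (r : List String × String) : List String :=
  if r.2 ≠ "" then r.1 ++ [PySem.Str.strip r.2] else r.1

def split_into_cases (text : String) : List String :=
  if text = "" then []
  else pvFinishA ((PySem.Str.splitlines text).foldl pvStepA ([], ""))

-- ===== PORT B =====
-- the `while` loop of Source B's _split_head: peel leading non-delimiter lines
def pvSplitHead : List String → List String × List String
  | [] => ([], [])
  | l :: ls =>
    if pvIsDelim l then ([], l :: ls)
    else
      let hr := pvSplitHead ls
      (l :: hr.1, hr.2)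

theorem pvSplitHead_snd_length_le : ∀ (ls : List String), (pvSplitHead ls).2.length ≤ ls.length
  | [] => Nat.le_refl _
  | l :: ls => by
    unfold pvSplitHead
    split
    · exact Nat.le_refl _
    · exact Nat.le_succ_of_le (pvSplitHead_snd_length_le ls)

-- Source B's _cases
def pvCases : List String → List String
  | [] => []
  | l :: ls =>
    let hr := pvSplitHead ls
    PySem.Str.strip (PySem.Str.join "\n" (l :: hr.1)) :: pvCases hr.2
termination_by ls => ls.length
decreasing_by
  simpa using Nat.lt_succ_of_le (pvSplitHead_snd_length_le ls)

def split_into_cases_alt (text : String) : List String :=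
  if text = "" then [] else pvCases (PySem.Str.splitlines text)

-- ===== PRECONDITION & SPEC =====
def Spec_split_into_cases (text : String) (out : List String) : Prop := out = split_into_cases_alt text
instance (text : String) (out : List String) : Decidable (Spec_split_into_cases text out) := by unfold Spec_split_into_cases; infer_instance

-- ===== CLAIM (what is proved, stated in full; the proofs are below) =====
def Claim_equal_split_into_cases : Prop := ∀ (text : String), Dom_split_into_cases text → Spec_split_into_cases text (split_into_cases text)

-- ===== LEMMAS AND PROOFS =====

-- A's current-case string for a segment of lines: each line plus "\n"
def pvCatNL : List String → String
  | [] => ""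
  | l :: ls => l ++ "\n" ++ pvCatNL ls

theorem pvCatNL_cons_ne (p : String) (ps : List String) : pvCatNL (p :: ps) ≠ "" := by
  intro h
  have := congrArg String.toList h
  simp [pvCatNL] at this

theorem pvCatNL_snoc (xs : List String) (l : String) :
    pvCatNL (xs ++ [l]) = pvCatNL xs ++ (l ++ "\n") := by
  induction xs with
  | nil => simp [pvCatNL]
  | cons x xs ih => simp [pvCatNL, ih, String.append_assoc]

theorem pvStrip_newline (s : String) :
    PySem.Str.strip (s ++ "\n") = PySem.Str.strip s := by
  apply String.toList_inj.mp
  have hnl : PySem.Chars.isspace '\n' = true := by decide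
  simp only [PySem.Str.toList_strip, String.toList_append,
    show ("\n" : String).toList = ['\n'] from rfl]
  simp only [PySem.Chars.strip, PySem.Chars.lstrip, PySem.Chars.rstrip]
  rw [List.dropWhile_append]
  split
  · next h =>
    rw [List.isEmpty_iff] at h
    rw [h]
    simp [hnl]
  · simp [List.reverse_append, hnl]

theorem pvCatNL_eq_join (p : String) (ps : List String) :
    pvCatNL (p :: ps) = PySem.Str.join "\n" (p :: ps) ++ "\n" := by
  induction ps generalizing p with
  | nil =>
    apply String.toList_inj.mp
    simp [pvCatNL, PySem.Str.toList_join, PySem.Chars.join_singleton]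
  | cons q qs ih =>
    apply String.toList_inj.mp
    have h1 := congrArg String.toList (ih q)
    simp only [pvCatNL] at h1 ⊢
    simp only [PySem.Str.toList_join, String.toList_append, List.map_cons,
      PySem.Chars.join_cons_cons, show ("\n" : String).toList = ['\n'] from rfl] at h1 ⊢
    simp only [List.append_assoc] at h1 ⊢
    simpa using h1

theorem pvStrip_catNL (p : String) (ps : List String) :
    PySem.Str.strip (pvCatNL (p :: ps)) = PySem.Str.strip (PySem.Str.join "\n" (p :: ps)) := by
  rw [pvCatNL_eq_join, pvStrip_newline]

-- Main invariant: A's loop, run from a non-empty current case pvCatNL (p :: ps),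
-- produces exactly B's block decomposition of the remaining lines.
theorem pvLoop_eq (lines : List String) : ∀ (acc : List String) (p : String) (ps : List String),
    pvFinishA (lines.foldl pvStepA (acc, pvCatNL (p :: ps)))
      = acc ++ PySem.Str.strip (PySem.Str.join "\n" (p :: ps ++ (pvSplitHead lines).1))
          :: pvCases (pvSplitHead lines).2 := by
  induction lines with
  | nil =>
    intro acc p ps
    simp [pvFinishA, pvCatNL_cons_ne, pvSplitHead, pvCases, pvStrip_catNL]
  | cons l ls ih =>
    intro acc p ps
    by_cases hd : pvIsDelim l = true
    · have hstep : pvStepA (acc, pvCatNL (p :: ps)) l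
          = (acc ++ [PySem.Str.strip (pvCatNL (p :: ps))], pvCatNL [l]) := by
        simp [pvStepA, hd, pvCatNL]
      rw [List.foldl_cons, hstep,
        show pvCatNL [l] = pvCatNL (l :: []) from rfl, ih]
      simp [pvSplitHead, hd, pvCases, pvStrip_catNL]
    · have hstep : pvStepA (acc, pvCatNL (p :: ps)) l
          = (acc, pvCatNL (p :: (ps ++ [l]))) := by
        simp only [pvStepA, hd,
          show p :: (ps ++ [l]) = (p :: ps) ++ [l] from rfl, pvCatNL_snoc]
        simp [String.append_assoc]
      rw [List.foldl_cons, hstep, ih]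
      simp [pvSplitHead, hd]

theorem split_into_cases_eq (text : String) :
    split_into_cases text = split_into_cases_alt text := by
  unfold split_into_cases split_into_cases_alt
  by_cases ht : text = ""
  · simp [ht]
  · simp only [if_neg ht]
    cases hls : PySem.Str.splitlines text with
    | nil => simp [pvCases, pvFinishA]
    | cons l ls =>
      have hfirst : pvStepA ([], "") l = ([], pvCatNL [l]) := by
        by_cases hd : pvIsDelim l = true <;> simp [pvStepA, hd, pvCatNL]
      rw [List.foldl_cons, hfirst,
        show pvCatNL [l] = pvCatNL (l :: []) from rfl, pvLoop_eq ls [] l []]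
      simp [pvCases]

-- ===== VERDICT (by name: the statement is the Claim_ definition above) =====
theorem split_into_cases_spec : Claim_equal_split_into_cases := by
  intro text _
  show split_into_cases text = split_into_cases_alt text
  exact split_into_cases_eq text
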